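-- pv_equiv track=rewrite | github.com/markvandenberg/aoc2025 | day08/solution.py | part1
-- ===== SOURCE A (Python) =====
-- import heapq
-- from collections import defaultdict
--
-- def parse_input(data):
--     """Parse junction box positions."""
--     lines = data.split('\n')
--     positions = []
--     for line in lines:
--         if line.strip():
--             x, y, z = map(int, line.split(','))
--             positions.append((x, y, z))
--     return positions
--
-- def distance_sq(p1, p2):
--     """Calculate squared Euclidean distance between two 3D points."""
--     return ((p1[0] - p2[0]) ** 2 +
--             (p1[1] - p2[1]) ** 2 +
--             (p1[2] - p2[2]) ** 2)
--
-- class UnionFind: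
--     """Union-Find data structure for tracking connected components."""
--
--     def __init__(self, n):
--         self.parent = list(range(n))
--         self.size = [1] * n
--
--     def find(self, x):
--         """Find root of x with path compression."""
--         if self.parent[x] != x:
--             self.parent[x] = self.find(self.parent[x])
--         return self.parent[x]
--
--     def union(self, x, y):
--         """Union two components. Returns True if they were not already connected."""
--         root_x = self.find(x)
--         root_y = self.find(y)
--
--         if root_x == root_y:
--             return False
--
--         # Union by size
--         if self.size[root_x] < self.size[root_y]:
--             root_x, root_y = root_y, root_x
--
--         self.parent[root_y] = root_x
--         self.size[root_x] += self.size[root_y]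
--         return True
--
--     def get_component_sizes(self):
--         """Get sizes of all connected components."""
--         components = defaultdict(int)
--         for i in range(len(self.parent)):
--             root = self.find(i)
--             components[root] = self.size[root]
--         return list(components.values())
--
-- def iter_edges(positions):
--     """Yield all unique edges with their squared distances."""
--     n = len(positions)
--     for i in range(n):
--         for j in range(i + 1, n):
--             yield (distance_sq(positions[i], positions[j]), i, j)
--
-- def part1(data, num_connections=1000):
--     """Connect the closest pairs and find product of three largest circuits."""
--     positions = parse_input(data)
--     n = len(positions)
--
--     smallest_edges = heapq.nsmallest(num_connections, iter_edges(positions))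
--
--     uf = UnionFind(n)
--     for _, i, j in smallest_edges:
--         uf.union(i, j)
--
--     sizes = uf.get_component_sizes()
--     sizes.sort(reverse=True)
--
--     if len(sizes) >= 3:
--         return sizes[0] * sizes[1] * sizes[2]
--     return 0
-- ===== SOURCE B (Python) =====
-- def parse_input(data):
--     """Parse junction box positions."""
--     lines = data.split('\n')
--     positions = []
--     for line in lines:
--         if line.strip():
--             x, y, z = map(int, line.split(','))
--             positions.append((x, y, z))
--     return positions
--
-- def distance_sq(p1, p2):
--     """Calculate squared Euclidean distance between two 3D points."""
--     return ((p1[0] - p2[0]) ** 2 +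
--             (p1[1] - p2[1]) ** 2 +
--             (p1[2] - p2[2]) ** 2)
--
-- def iter_edges(positions):
--     """Yield all unique edges with their squared distances."""
--     n = len(positions)
--     for i in range(n):
--         for j in range(i + 1, n):
--             yield (distance_sq(positions[i], positions[j]), i, j)
--
-- def part1(data, num_connections=1000):
--     """Connect the closest pairs and find product of three largest circuits."""
--     positions = parse_input(data)
--     n = len(positions)
--
--     edges = sorted(iter_edges(positions))
--     chosen = edges[:num_connections] if num_connections > 0 else []
--
--     # flat component-label array: merge two components by relabelling one
--     comp = list(range(n))
--     for _, i, j in chosen: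
--         ci, cj = comp[i], comp[j]
--         if ci != cj:
--             comp = [ci if c == cj else c for c in comp]
--
--     # count members per label (insertion order = first appearance)
--     counts = {}
--     for c in comp:
--         counts[c] = counts.get(c, 0) + 1
--
--     sizes = sorted(counts.values(), reverse=True)
--     if len(sizes) >= 3:
--         return sizes[0] * sizes[1] * sizes[2]
--     return 0
-- ===== Notes on version B (the rewrite author's own statement) =====
-- stated objective: alternative
-- what changed: Union-Find (recursive find with path compression, union by size, root-keyed size dict) is replaced by a flat component-label array that is relabelled on each merging edge, plus a counting dict over the labels; heapq.nsmallest is replaced by sort-then-slice.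
import Mathlib
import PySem

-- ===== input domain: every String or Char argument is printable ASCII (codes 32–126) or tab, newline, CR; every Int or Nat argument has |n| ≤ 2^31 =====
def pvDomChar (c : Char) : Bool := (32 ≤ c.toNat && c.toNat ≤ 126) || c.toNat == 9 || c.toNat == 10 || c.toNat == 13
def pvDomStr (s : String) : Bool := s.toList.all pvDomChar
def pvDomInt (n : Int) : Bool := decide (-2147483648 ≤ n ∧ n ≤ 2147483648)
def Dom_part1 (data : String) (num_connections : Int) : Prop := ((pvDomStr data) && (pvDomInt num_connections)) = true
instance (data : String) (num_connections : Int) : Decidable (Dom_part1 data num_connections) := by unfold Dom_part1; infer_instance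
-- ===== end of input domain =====

-- B replaces union-find by a flat component-label array relabelled per merging edge (and
-- nsmallest by sort-then-slice); proved: same return value on every input A accepts.

-- ===== PORT A =====
-- shared module helpers (parse_input / distance_sq / iter_edges, used verbatim by both Pythons)
def distanceSq (p q : Int × Int × Int) : Int :=
  (p.1 - q.1) ^ 2 + (p.2.1 - q.2.1) ^ 2 + (p.2.2 - q.2.2) ^ 2

-- parse_input; none = the ValueError Python raises on a malformed non-blank line
def parseLines : List (List Char) → Option (List (Int × Int × Int))
  | [] => some []
  | line :: rest =>
    if PySem.Chars.strip line = [] then parseLines rest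
    else
      match PySem.Chars.splitOn line [','] with
      | [a, b, c] =>
        match PySem.Int.ofChars? a, PySem.Int.ofChars? b, PySem.Int.ofChars? c with
        | some x, some y, some z => (parseLines rest).map (fun ps => (x, y, z) :: ps)
        | _, _, _ => none
      | _ => none

def parseInput? (data : String) : Option (List (Int × Int × Int)) :=
  parseLines (PySem.Chars.splitOn data.toList ['\n'])

def iterEdges (ps : List (Int × Int × Int)) : List (Int × Int × Int) :=
  (PySem.List.pyRange 0 (PySem.List.len ps) 1).flatMap (fun i =>
    (PySem.List.pyRange (i + 1) (PySem.List.len ps) 1).map (fun j =>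
      (distanceSq (PySem.List.pyGetD ps i (0, 0, 0)) (PySem.List.pyGetD ps j (0, 0, 0)), i, j)))

-- heapq.nsmallest(k, xs) = sorted(xs)[:k] (k ≤ 0 gives []); ties under (dist, i) are resolved by
-- stability to generation order (j ascending) = Python's full lexicographic tuple order
def nsmallestEdges (k : Int) (es : List (Int × Int × Int)) : List (Int × Int × Int) :=
  if k ≤ 0 then []
  else (PySem.List.sorted2 es (fun e => e.1) (fun e => e.2.1) false).take k.toNat

-- UnionFind.find with path compression; fuel = len(parent)+1 always suffices on the forests A builds
def ufFind (fuel : Nat) (parent : List Int) (x : Int) : List Int × Int :=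
  match fuel with
  | 0 => (parent, x)
  | fuel + 1 =>
    let p := PySem.List.pyGetD parent x 0
    if p ≠ x then
      let f := ufFind fuel parent p
      (PySem.List.pySetD f.1 x f.2, f.2)
    else (parent, x)

def ufUnion (parent size : List Int) (x y : Int) : List Int × List Int :=
  let fx := ufFind (parent.length + 1) parent x
  let fy := ufFind (fx.1.length + 1) fx.1 y
  let p2 := fy.1
  if fx.2 = fy.2 then (p2, size)
  else
    let rr := if PySem.List.pyGetD size fx.2 0 < PySem.List.pyGetD size fy.2 0
              then (fy.2, fx.2) else (fx.2, fy.2)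
    (PySem.List.pySetD p2 rr.2 rr.1,
     PySem.List.pySetD size rr.1 (PySem.List.pyGetD size rr.1 0 + PySem.List.pyGetD size rr.2 0))

def ufSizes (parent size : List Int) : List Int :=
  ((PySem.List.pyRange 0 (PySem.List.len parent) 1).foldl
    (fun (st : List Int × PySem.Dict Int Int) i =>
      let f := ufFind (st.1.length + 1) st.1 i
      (f.1, st.2.insert f.2 (PySem.List.pyGetD size f.2 0)))
    (parent, PySem.Dict.empty)).2.values

def part1 (data : String) (num_connections : Int) : Int :=
  match parseInput? data with
  | none => 0  -- Python raises ValueError here; excluded by Pre_part1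
  | some positions =>
    let n := positions.length
    let smallest := nsmallestEdges num_connections (iterEdges positions)
    let st := smallest.foldl (fun (st : List Int × List Int) e => ufUnion st.1 st.2 e.2.1 e.2.2)
      (PySem.List.pyRange 0 (n : Int) 1, List.replicate n 1)
    let sizes := PySem.List.sorted (ufSizes st.1 st.2) (fun x => x) true
    if 3 ≤ sizes.length then
      PySem.List.pyGetD sizes 0 0 * PySem.List.pyGetD sizes 1 0 * PySem.List.pyGetD sizes 2 0
    else 0

-- ===== PORT B =====
def part1_alt (data : String) (num_connections : Int) : Int :=
  match parseInput? data with
  | none => 0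
  | some positions =>
    let n := positions.length
    let edges := PySem.List.sorted2 (iterEdges positions) (fun e => e.1) (fun e => e.2.1) false
    let chosen := if 0 < num_connections then PySem.List.slice edges none (some num_connections) else []
    let comp := chosen.foldl (fun comp e =>
        let ci := PySem.List.pyGetD comp e.2.1 0
        let cj := PySem.List.pyGetD comp e.2.2 0
        if ci ≠ cj then comp.map (fun c => if c = cj then ci else c) else comp)
      (PySem.List.pyRange 0 (n : Int) 1)
    let counts := comp.foldl (fun (d : PySem.Dict Int Int) c => d.insert c (d.getD c 0 + 1))
      PySem.Dict.empty
    let sizes := PySem.List.sorted counts.values (fun x => x) true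
    if 3 ≤ sizes.length then
      PySem.List.pyGetD sizes 0 0 * PySem.List.pyGetD sizes 1 0 * PySem.List.pyGetD sizes 2 0
    else 0

-- ===== PRECONDITION & SPEC =====
-- Pre_: every non-blank line of data must split on ',' into exactly three int()-parseable fields
-- (otherwise Python's parse_input raises ValueError)
def Pre_part1 (data : String) (num_connections : Int) : Prop :=
  ∀ line ∈ PySem.Chars.splitOn data.toList ['\n'],
    PySem.Chars.strip line ≠ [] →
      (PySem.Chars.splitOn line [',']).length = 3 ∧
      ∀ f ∈ PySem.Chars.splitOn line [','], (PySem.Int.ofChars? f).isSome = true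

instance (data : String) (num_connections : Int) : Decidable (Pre_part1 data num_connections) := by
  unfold Pre_part1; infer_instance

def pvWitness_part1 : String × Int := ("1,2,3\n4,5,6\n7,8,9", 2)

def Spec_part1 (data : String) (num_connections : Int) (out : Int) : Prop := out = part1_alt data num_connections
instance (data : String) (num_connections : Int) (out : Int) : Decidable (Spec_part1 data num_connections out) := by unfold Spec_part1; infer_instance

-- ===== CLAIM (what is proved, stated in full; the proofs are below) =====
def Claim_equal_part1 : Prop := ∀ (data : String) (num_connections : Int), Dom_part1 data num_connections → Pre_part1 data num_connections → Spec_part1 data num_connections (part1 data num_connections)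

-- ===== LEMMAS AND PROOFS =====
-- ---- reachability in the parent forest ----
def gP (p : List Int) (x : Int) : Int := PySem.List.pyGetD p x 0

inductive UFReach (p : List Int) : Int → Int → Nat → Prop
  | root (x : Int) (h : gP p x = x) : UFReach p x x 0
  | step (x r : Int) (k : Nat) (h : gP p x ≠ x) (h2 : UFReach p (gP p x) r k) : UFReach p x r (k + 1)

def Reaches (p : List Int) (x r : Int) : Prop := ∃ k, UFReach p x r k

theorem ufreach_det {p : List Int} {x r r' : Int} {k k' : Nat}
    (h : UFReach p x r k) (h' : UFReach p x r' k') : r = r' ∧ k = k' := by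
  induction h generalizing r' k' with
  | root x hx =>
    cases h' with
    | root => exact ⟨rfl, rfl⟩
    | step _ _ _ hne => exact absurd hx hne
  | step x r k hne h2 ih =>
    cases h' with
    | root _ hx => exact absurd hx hne
    | step _ _ k2 _ h2' => obtain ⟨e1, e2⟩ := ih h2'; exact ⟨e1, by omega⟩

theorem reaches_det {p : List Int} {x r r' : Int} (h : Reaches p x r) (h' : Reaches p x r') : r = r' := by
  obtain ⟨k, h⟩ := h; obtain ⟨k', h'⟩ := h'; exact (ufreach_det h h').1

theorem ufreach_root_out {p : List Int} {x r : Int} {k : Nat} (h : UFReach p x r k) : gP p r = r := by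
  induction h with
  | root _ hx => exact hx
  | step => assumption

theorem reaches_root_out {p : List Int} {x r : Int} (h : Reaches p x r) : gP p r = r := by
  obtain ⟨k, h⟩ := h; exact ufreach_root_out h

theorem ufreach_of_root {p : List Int} {x s : Int} {k : Nat} (hx : gP p x = x) (h : UFReach p x s k) : s = x := by
  cases h with
  | root => rfl
  | step _ _ _ hne => exact absurd hx hne

theorem reaches_of_root {p : List Int} {x s : Int} (hx : gP p x = x) (h : Reaches p x s) : s = x := by
  obtain ⟨k, h⟩ := h; exact ufreach_of_root hx h

theorem reaches_self_of_root {p : List Int} {x : Int} (hx : gP p x = x) : Reaches p x x :=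
  ⟨0, .root x hx⟩

-- range & basic invariant
def InRng (n : Nat) (x : Int) : Prop := 0 ≤ x ∧ x < (n : Int)

def PB (n : Nat) (p : List Int) : Prop :=
  p.length = n ∧ ∀ x : Int, InRng n x → InRng n (gP p x)

def InvB (n : Nat) (p : List Int) : Prop :=
  PB n p ∧ ∀ x : Int, InRng n x → ∃ r, Reaches p x r

theorem ufreach_rng {n : Nat} {p : List Int} {x r : Int} {k : Nat} (hb : PB n p)
    (h : UFReach p x r k) : InRng n x → InRng n r := by
  induction h with
  | root => exact id
  | step x r k hne h2 ih => intro hx; exact ih (hb.2 x hx)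

theorem reaches_rng {n : Nat} {p : List Int} {x r : Int} (hb : PB n p)
    (h : Reaches p x r) (hx : InRng n x) : InRng n r := by
  obtain ⟨k, h⟩ := h; exact ufreach_rng hb h hx

-- pigeonhole: a terminating chain inside range has fewer than n steps
theorem ufreach_shift {p : List Int} {x r : Int} {k : Nat} (h : UFReach p x r k) :
    ∀ m, m ≤ k → UFReach p ((fun y => gP p y)^[m] x) r (k - m) := by
  intro m
  induction m generalizing x r k with
  | zero => intro _; simpa using h
  | succ m ih =>
    intro hm
    cases h with
    | root _ hx => omega
    | step _ _ k0 hne h2 =>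
      have := ih (x := gP p x) (r := r) (k := k0) h2 (by omega)
      have hiter : (fun y => gP p y)^[m+1] x = (fun y => gP p y)^[m] (gP p x) := by
        rw [Function.iterate_succ_apply]
      rw [hiter]
      have he : k0 - m = k0 + 1 - (m + 1) := by omega
      rwa [← he]

theorem ufreach_len_lt {n : Nat} {p : List Int} {x r : Int} {k : Nat} (hb : PB n p)
    (hx : InRng n x) (h : UFReach p x r k) : k < n := by
  have hrng : ∀ m, InRng n ((fun y => gP p y)^[m] x) := by
    intro m
    induction m with
    | zero => simpa using hx
    | succ m ih => rw [Function.iterate_succ_apply']; exact hb.2 _ ih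
  have hinj : ∀ m1 m2, m1 ≤ k → m2 ≤ k →
      (fun y => gP p y)^[m1] x = (fun y => gP p y)^[m2] x → m1 = m2 := by
    intro m1 m2 h1 h2 he
    have r1 := ufreach_shift h m1 h1
    have r2 := ufreach_shift h m2 h2
    rw [he] at r1
    have := (ufreach_det r1 r2).2
    omega
  have hn : 0 < n := by
    rcases hx with ⟨h0, h1⟩; omega
  by_contra hk
  push Not at hk
  have : Function.Injective (fun m : Fin (k+1) => (⟨((fun y => gP p y)^[m.1] x).toNat, by
      have := hrng m.1; rcases this with ⟨a, b⟩; omega⟩ : Fin n)) := by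
    intro m1 m2 he
    have h1 := hrng m1.1
    have h2 := hrng m2.1
    simp only [Fin.mk.injEq] at he
    have : (fun y => gP p y)^[m1.1] x = (fun y => gP p y)^[m2.1] x := by
      rcases h1 with ⟨a1, _⟩; rcases h2 with ⟨a2, _⟩; omega
    exact Fin.ext (hinj m1.1 m2.1 (by omega) (by omega) this)
  have := Fintype.card_le_of_injective _ this
  simp at this
  omega
-- ---- updating one parent pointer ----
theorem gP_setD {p : List Int} {i : Int} (v : Int) (hi0 : 0 ≤ i) (_hil : i < (p.length : Int))
    (j : Int) (hj0 : 0 ≤ j) (hjl : j < (p.length : Int)) :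
    gP (PySem.List.pySetD p i v) j = if j = i then v else gP p j := by
  unfold gP
  rw [PySem.List.pySetD_of_nonneg p v hi0]
  rw [PySem.List.pyGetD_eq_getElem _ _ hj0 (by simpa using hjl),
      PySem.List.pyGetD_eq_getElem _ _ hj0 hjl]
  rw [List.getElem_set]
  split_ifs with h1 h2 h2
  · rfl
  · omega
  · omega
  · rfl

theorem length_setD (p : List Int) (i v : Int) : (PySem.List.pySetD p i v).length = p.length :=
  PySem.List.length_pySetD p i v

-- path compression: pointing x straight at its root changes no root
theorem reach_set {n : Nat} {p : List Int} {x r : Int} (hb : PB n p) (hx : InRng n x)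
    (hr : Reaches p x r) :
    ∀ y s, InRng n y → Reaches p y s → Reaches (PySem.List.pySetD p x r) y s := by
  have hlen := hb.1
  have hrrng : InRng n r := reaches_rng hb hr hx
  have hroot : gP p r = r := reaches_root_out hr
  have hg : ∀ j, InRng n j → gP (PySem.List.pySetD p x r) j = if j = x then r else gP p j := by
    intro j hj
    exact gP_setD r hx.1 (by rw [hlen]; exact hx.2) j hj.1 (by rw [hlen]; exact hj.2)
  suffices h : ∀ (y s : Int) (k : Nat), UFReach p y s k → InRng n y → Reaches (PySem.List.pySetD p x r) y s by
    intro y s hy hs; obtain ⟨k, hk⟩ := hs; exact h y s k hk hy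
  intro y s k hk
  induction hk with
  | root y hy0 =>
    intro hy
    by_cases hyx : y = x
    · have hrx : r = x := reaches_of_root (hyx ▸ hy0) hr
      exact reaches_self_of_root (by rw [hg y hy, if_pos hyx]; omega)
    · exact reaches_self_of_root (by rw [hg y hy]; simp [hyx, hy0])
  | step y s k hne h2 ih =>
    intro hy
    by_cases hyx : y = x
    · subst hyx
      have hsr : s = r := reaches_det ⟨k + 1, .step y s k hne h2⟩ hr
      subst hsr
      have hrx : s ≠ y := by
        intro h
        exact hne (h ▸ hroot)
      refine ⟨1, .step y s 0 ?_ ?_⟩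
      · rw [hg y hy]; simp [hrx]
      · have hgy : gP (PySem.List.pySetD p y s) y = s := by rw [hg y hy]; simp
        rw [hgy]
        exact .root s (by rw [hg s hrrng]; simp [hroot])
    · have hstep : gP (PySem.List.pySetD p x r) y = gP p y := by rw [hg y hy]; simp [hyx]
      obtain ⟨k', hk'⟩ := ih (hb.2 y hy)
      exact ⟨k' + 1, .step y s k' (by rw [hstep]; exact hne) (by rw [hstep]; exact hk')⟩

-- linking root b under root a merges exactly the two classes
theorem reach_link {n : Nat} {p : List Int} {a b : Int} (hb : PB n p)
    (ha : InRng n a) (hbr : InRng n b) (hra : gP p a = a) (hrb : gP p b = b) (hab : a ≠ b) :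
    ∀ y s, InRng n y → Reaches p y s → Reaches (PySem.List.pySetD p b a) y (if s = b then a else s) := by
  have hlen := hb.1
  have hg : ∀ j, InRng n j → gP (PySem.List.pySetD p b a) j = if j = b then a else gP p j := by
    intro j hj
    exact gP_setD a hbr.1 (by rw [hlen]; exact hbr.2) j hj.1 (by rw [hlen]; exact hj.2)
  have hroota : Reaches (PySem.List.pySetD p b a) a a :=
    reaches_self_of_root (by rw [hg a ha]; simp [hab, hra])
  suffices h : ∀ (y s : Int) (k : Nat), UFReach p y s k → InRng n y →
      Reaches (PySem.List.pySetD p b a) y (if s = b then a else s) by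
    intro y s hy hs; obtain ⟨k, hk⟩ := hs; exact h y s k hk hy
  intro y s k hk
  induction hk with
  | root y hy0 =>
    intro hy
    by_cases hyb : y = b
    · have hsb : y = b := hyb
      rw [show (if y = b then a else y) = a from if_pos hyb]
      obtain ⟨k', hk'⟩ := hroota
      refine ⟨k' + 1, .step y a k' ?_ ?_⟩
      · rw [hg y hy, if_pos hyb]; omega
      · rw [show gP (PySem.List.pySetD p b a) y = a from by rw [hg y hy, if_pos hyb]]
        exact hk'
    · simp only [if_neg hyb]
      exact reaches_self_of_root (by rw [hg y hy]; simp [hyb, hy0])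
  | step y s k hne h2 ih =>
    intro hy
    have hyb : y ≠ b := by
      intro h; subst h; exact hne hrb
    obtain ⟨k', hk'⟩ := ih (hb.2 y hy)
    have hstep : gP (PySem.List.pySetD p b a) y = gP p y := by rw [hg y hy]; simp [hyb]
    exact ⟨k' + 1, .step y _ k' (by rw [hstep]; exact hne) (by rw [hstep]; exact hk')⟩

-- find: returns the root, keeps lengths/bounds, and changes no root
theorem find_spec {n : Nat} : ∀ (fuel : Nat) (p : List Int) (x r : Int) (k : Nat),
    InvB n p → InRng n x → UFReach p x r k → k < fuel →
    (ufFind fuel p x).2 = r ∧ InvB n (ufFind fuel p x).1 ∧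
      (∀ y s, InRng n y → Reaches p y s → Reaches (ufFind fuel p x).1 y s) := by
  intro fuel
  induction fuel with
  | zero => intro p x r k _ _ _ h; omega
  | succ fuel ih =>
    intro p x r k hinv hx hr hk
    by_cases hne : gP p x = x
    · have h' : PySem.List.pyGetD p x 0 = x := hne
      have heval : ufFind (fuel + 1) p x = (p, x) := by
        simp [ufFind, h']
      rw [heval]
      have hrx : r = x := ufreach_of_root hne hr
      exact ⟨hrx.symm, hinv, fun y s _ h => h⟩
    · cases hr with
      | root _ h0 => exact absurd h0 hne
      | step _ _ k0 _ h2 =>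
        have hpx : InRng n (gP p x) := hinv.1.2 x hx
        have step := ih p (gP p x) r k0 hinv hpx h2 (by omega)
        have heval : ufFind (fuel + 1) p x =
            (PySem.List.pySetD (ufFind fuel p (gP p x)).1 x (ufFind fuel p (gP p x)).2,
             (ufFind fuel p (gP p x)).2) := by
          simp only [ufFind, gP] at hne ⊢
          rw [if_pos hne]
        obtain ⟨hres, hinv1, hpres1⟩ := step
        set p1 := (ufFind fuel p (gP p x)).1 with hp1
        have hxr1 : Reaches p1 x r :=
          hpres1 x r hx ⟨k0 + 1, UFReach.step x r k0 hne h2⟩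
        rw [heval, hres]
        have hb1 : PB n p1 := hinv1.1
        have hpres2 := reach_set (n := n) hb1 hx hxr1
        have hrrng : InRng n r := reaches_rng hb1 hxr1 hx
        refine ⟨rfl, ⟨⟨?_, ?_⟩, ?_⟩, ?_⟩
        · show (PySem.List.pySetD p1 x r).length = n
          rw [length_setD]; exact hb1.1
        · intro z hz
          show InRng n (gP (PySem.List.pySetD p1 x r) z)
          have hgz := gP_setD (p := p1) (i := x) r hx.1 (by rw [hb1.1]; exact hx.2) z hz.1 (by rw [hb1.1]; exact hz.2)
          rw [hgz]
          split_ifs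
          · exact hrrng
          · exact hb1.2 z hz
        · intro z hz
          obtain ⟨s, hs⟩ := hinv1.2 z hz
          exact ⟨s, hpres2 z s hz hs⟩
        · intro y s hy hs
          exact hpres2 y s hy (hpres1 y s hy hs)
-- ---- the partition invariant tying A's forest+sizes to B's label array ----
def EqvP (p : List Int) (x y : Int) : Prop := ∃ r, Reaches p x r ∧ Reaches p y r

def INVP (n : Nat) (p size comp : List Int) : Prop :=
  InvB n p ∧ size.length = n ∧ comp.length = n ∧
  (∀ x y, InRng n x → InRng n y → (EqvP p x y ↔ gP comp x = gP comp y)) ∧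
  (∀ r, InRng n r → gP p r = r → gP size r = (comp.count (gP comp r) : Int))

theorem gP_map {comp : List Int} (f : Int → Int) {x : Int} (hx0 : 0 ≤ x) (hxl : x < (comp.length : Int)) :
    gP (comp.map f) x = f (gP comp x) := by
  unfold gP
  rw [PySem.List.pyGetD_eq_getElem _ _ hx0 (by simpa using hxl),
      PySem.List.pyGetD_eq_getElem _ _ hx0 hxl]
  simp

theorem count_map_collapse {ci cj : Int} (h : ci ≠ cj) (l : List Int) :
    (l.map (fun c => if c = cj then ci else c)).count ci = l.count ci + l.count cj := by
  induction l with
  | nil => simp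
  | cons c t ih =>
    simp only [List.map_cons, List.count_cons, ih]
    by_cases h1 : c = cj <;> by_cases h2 : c = ci <;>
      simp [h1, h2, h, Ne.symm h] <;> omega

theorem count_map_other {ci cj L : Int} (h1 : L ≠ ci) (h2 : L ≠ cj) (l : List Int) :
    (l.map (fun c => if c = cj then ci else c)).count L = l.count L := by
  induction l with
  | nil => simp
  | cons c t ih =>
    simp only [List.map_cons, List.count_cons, ih]
    by_cases hc : c = cj <;> simp [hc, Ne.symm h1, Ne.symm h2]

theorem equiv_of_pres {n : Nat} {p p' : List Int}
    (hex : ∀ z, InRng n z → ∃ r, Reaches p z r)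
    (pres : ∀ y s, InRng n y → Reaches p y s → Reaches p' y s)
    {x y : Int} (hx : InRng n x) (hy : InRng n y) :
    EqvP p x y ↔ EqvP p' x y := by
  constructor
  · rintro ⟨t, h1, h2⟩
    exact ⟨t, pres x t hx h1, pres y t hy h2⟩
  · rintro ⟨t, h1, h2⟩
    obtain ⟨r1, hr1⟩ := hex x hx
    obtain ⟨r2, hr2⟩ := hex y hy
    have e1 : r1 = t := reaches_det (pres x r1 hx hr1) h1
    have e2 : r2 = t := reaches_det (pres y r2 hy hr2) h2
    exact ⟨t, e1 ▸ hr1, e2 ▸ hr2⟩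

theorem collapse_bridge {a b ri rj ci cj rx ry lx ly : Int}
    (hcases : (a = ri ∧ b = rj) ∨ (a = rj ∧ b = ri))
    (hrirj : ri ≠ rj)
    (bx1 : rx = ri ↔ lx = ci) (bx2 : rx = rj ↔ lx = cj)
    (by1 : ry = ri ↔ ly = ci) (by2 : ry = rj ↔ ly = cj)
    (bxy : rx = ry ↔ lx = ly) :
    ((if rx = b then a else rx) = (if ry = b then a else ry)) ↔
    ((if lx = cj then ci else lx) = (if ly = cj then ci else ly)) := by
  rcases hcases with ⟨ha, hb⟩ | ⟨ha, hb⟩ <;> subst ha <;> subst hb <;>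
    simp only [← bx2, ← by2] <;> split_ifs <;> omega

theorem union_step {n : Nat} {p size comp : List Int} (hinv : INVP n p size comp)
    {i j : Int} (hi : InRng n i) (hj : InRng n j) :
    INVP n (ufUnion p size i j).1 (ufUnion p size i j).2
      (if gP comp i ≠ gP comp j then comp.map (fun c => if c = gP comp j then gP comp i else c) else comp) := by
  obtain ⟨hinvB, hslen, hclen, hiff, hsz⟩ := hinv
  have hb : PB n p := hinvB.1
  have hex : ∀ z, InRng n z → ∃ r, Reaches p z r := hinvB.2
  have hplen : p.length = n := hb.1
  obtain ⟨ri0, hri0⟩ := hex i hi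
  obtain ⟨ki, hki⟩ := hri0
  have hri0' : Reaches p i ri0 := ⟨ki, hki⟩
  have F1 := find_spec (n := n) (p.length + 1) p i ri0 ki hinvB hi hki
    (by have := ufreach_len_lt hb hi hki; omega)
  obtain ⟨hfx2, hinv1, hpres1⟩ := F1
  obtain ⟨rj0, hrj0⟩ := hex j hj
  have hrj1 : Reaches (ufFind (p.length + 1) p i).1 j rj0 := hpres1 j rj0 hj hrj0
  obtain ⟨kj, hkj⟩ := hrj1
  have F2 := find_spec (n := n) ((ufFind (p.length + 1) p i).1.length + 1)
    (ufFind (p.length + 1) p i).1 j rj0 kj hinv1 hj hkj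
    (by have h1 := ufreach_len_lt hinv1.1 hj hkj
        have h2 : (ufFind (p.length + 1) p i).1.length = n := hinv1.1.1
        omega)
  obtain ⟨hfy2, hinv2, hpres2⟩ := F2
  set p1 := (ufFind (p.length + 1) p i).1 with hp1def
  set p2 := (ufFind (p1.length + 1) p1 j).1 with hp2def
  have h2len : p2.length = n := hinv2.1.1
  have hex2 : ∀ z, InRng n z → ∃ r, Reaches p2 z r := hinv2.2
  have hpres : ∀ y s, InRng n y → Reaches p y s → Reaches p2 y s := by
    intro y s hy hs
    exact hpres2 y s hy (hpres1 y s hy hs)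
  have hu : ufUnion p size i j =
      (if (ufFind (p.length + 1) p i).2 = (ufFind (p1.length + 1) p1 j).2 then (p2, size)
       else
         let rr := if PySem.List.pyGetD size (ufFind (p.length + 1) p i).2 0 <
             PySem.List.pyGetD size (ufFind (p1.length + 1) p1 j).2 0
           then ((ufFind (p1.length + 1) p1 j).2, (ufFind (p.length + 1) p i).2)
           else ((ufFind (p.length + 1) p i).2, (ufFind (p1.length + 1) p1 j).2)
         (PySem.List.pySetD p2 rr.2 rr.1,
          PySem.List.pySetD size rr.1 (PySem.List.pyGetD size rr.1 0 + PySem.List.pyGetD size rr.2 0))) := rfl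
  rw [hfx2, hfy2] at hu
  have hrirng : InRng n ri0 := reaches_rng hb hri0' hi
  have hrjrng : InRng n rj0 := reaches_rng hb hrj0 hj
  have hriroot : gP p ri0 = ri0 := reaches_root_out hri0'
  have hrjroot : gP p rj0 = rj0 := reaches_root_out hrj0
  have hriself : Reaches p ri0 ri0 := reaches_self_of_root hriroot
  have hrjself : Reaches p rj0 rj0 := reaches_self_of_root hrjroot
  set ci := gP comp i with hcidef
  set cj := gP comp j with hcjdef
  have hlci : gP comp ri0 = ci := (hiff ri0 i hrirng hi).1 ⟨ri0, hriself, hri0'⟩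
  have hlcj : gP comp rj0 = cj := (hiff rj0 j hrjrng hj).1 ⟨rj0, hrjself, hrj0⟩
  have hroot_iff_ci : ∀ x rx, InRng n x → Reaches p x rx → (rx = ri0 ↔ gP comp x = ci) := by
    intro x rx hx hrx
    constructor
    · intro h
      exact (hiff x i hx hi).1 ⟨ri0, h ▸ hrx, hri0'⟩
    · intro h
      obtain ⟨t, h1, h2⟩ := (hiff x i hx hi).2 h
      have := reaches_det hrx h1
      have := reaches_det hri0' h2
      omega
  have hroot_iff_cj : ∀ x rx, InRng n x → Reaches p x rx → (rx = rj0 ↔ gP comp x = cj) := by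
    intro x rx hx hrx
    constructor
    · intro h
      exact (hiff x j hx hj).1 ⟨rj0, h ▸ hrx, hrj0⟩
    · intro h
      obtain ⟨t, h1, h2⟩ := (hiff x j hx hj).2 h
      have := reaches_det hrx h1
      have := reaches_det hrj0 h2
      omega
  have hroots_eq : ∀ x y rx ry, InRng n x → InRng n y → Reaches p x rx → Reaches p y ry →
      (rx = ry ↔ gP comp x = gP comp y) := by
    intro x y rx ry hx hy hrx hry
    constructor
    · intro h
      exact (hiff x y hx hy).1 ⟨rx, hrx, h ▸ hry⟩
    · intro h
      obtain ⟨t, h1, h2⟩ := (hiff x y hx hy).2 h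
      have := reaches_det hrx h1
      have := reaches_det hry h2
      omega
  have hcicj : ri0 = rj0 ↔ ci = cj := hroots_eq i j ri0 rj0 hi hj hri0' hrj0
  by_cases hEq : ri0 = rj0
  · -- roots equal: nothing changes
    have hceq : ci = cj := hcicj.1 hEq
    rw [hu, if_pos hEq, if_neg (show ¬ ci ≠ cj from fun h => h hceq)]
    refine ⟨hinv2, hslen, hclen, ?_, ?_⟩
    · intro x y hx hy
      rw [← equiv_of_pres (n := n) hex hpres hx hy]
      exact hiff x y hx hy
    · intro r hr hroot2
      have hrootp : gP p r = r := by
        obtain ⟨s, hs⟩ := hex r hr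
        have := reaches_of_root hroot2 (hpres r s hr hs)
        subst this
        exact reaches_root_out hs
      exact hsz r hr hrootp
  · -- roots differ: link b beneath a, relabel cj to ci
    have hcne : ci ≠ cj := fun h => hEq (hcicj.2 h)
    suffices key : ∀ a b : Int, (a = ri0 ∧ b = rj0) ∨ (a = rj0 ∧ b = ri0) →
        INVP n (PySem.List.pySetD p2 b a)
          (PySem.List.pySetD size a (PySem.List.pyGetD size a 0 + PySem.List.pyGetD size b 0))
          (comp.map fun c => if c = cj then ci else c) by
      rw [hu, if_neg hEq, if_pos hcne]
      by_cases hlt : PySem.List.pyGetD size ri0 0 < PySem.List.pyGetD size rj0 0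
      · rw [if_pos hlt]
        exact key rj0 ri0 (Or.inr ⟨rfl, rfl⟩)
      · rw [if_neg hlt]
        exact key ri0 rj0 (Or.inl ⟨rfl, rfl⟩)
    intro a b hab_cases
    have hab : a ≠ b := by
      rcases hab_cases with ⟨h1, h2⟩ | ⟨h1, h2⟩ <;> rw [h1, h2] <;>
        first | exact hEq | exact Ne.symm hEq
    have harng : InRng n a := by
      rcases hab_cases with ⟨h1, _⟩ | ⟨h1, _⟩ <;> rw [h1] <;> assumption
    have hbrng : InRng n b := by
      rcases hab_cases with ⟨_, h2⟩ | ⟨_, h2⟩ <;> rw [h2] <;> assumption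
    have haroot2 : gP p2 a = a := by
      rcases hab_cases with ⟨h1, _⟩ | ⟨h1, _⟩ <;> rw [h1]
      · exact reaches_root_out (hpres i ri0 hi hri0')
      · exact reaches_root_out (hpres j rj0 hj hrj0)
    have hbroot2 : gP p2 b = b := by
      rcases hab_cases with ⟨_, h2⟩ | ⟨_, h2⟩ <;> rw [h2]
      · exact reaches_root_out (hpres j rj0 hj hrj0)
      · exact reaches_root_out (hpres i ri0 hi hri0')
    have hb2 : PB n p2 := hinv2.1
    have hlink := reach_link (n := n) hb2 harng hbrng haroot2 hbroot2 hab
    set p3 := PySem.List.pySetD p2 b a with hp3def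
    have hg3 : ∀ z, InRng n z → gP p3 z = if z = b then a else gP p2 z := by
      intro z hz
      exact gP_setD a hbrng.1 (by rw [h2len]; exact hbrng.2) z hz.1 (by rw [h2len]; exact hz.2)
    have h3len : p3.length = n := by rw [hp3def, length_setD]; exact h2len
    have hb3 : PB n p3 := by
      refine ⟨h3len, ?_⟩
      intro z hz
      rw [hg3 z hz]
      split_ifs
      · exact harng
      · exact hb2.2 z hz
    have hpres3 : ∀ y s, InRng n y → Reaches p y s → Reaches p3 y (if s = b then a else s) := by
      intro y s hy hs
      exact hlink y s hy (hpres y s hy hs)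
    have hex3 : ∀ z, InRng n z → ∃ r, Reaches p3 z r := by
      intro z hz
      obtain ⟨s, hs⟩ := hex z hz
      exact ⟨_, hpres3 z s hz hs⟩
    refine ⟨⟨hb3, hex3⟩, by rw [length_setD]; exact hslen, by rw [List.length_map]; exact hclen, ?_, ?_⟩
    · -- label correspondence after the merge
      intro x y hx hy
      obtain ⟨rx, hrx⟩ := hex x hx
      obtain ⟨ry, hry⟩ := hex y hy
      have hrxrng : InRng n rx := reaches_rng hb hrx hx
      have hryrng : InRng n ry := reaches_rng hb hry hy
      have hx3 : Reaches p3 x (if rx = b then a else rx) := hpres3 x rx hx hrx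
      have hy3 : Reaches p3 y (if ry = b then a else ry) := hpres3 y ry hy hry
      have hLHS : EqvP p3 x y ↔ (if rx = b then a else rx) = (if ry = b then a else ry) := by
        constructor
        · rintro ⟨t, h1, h2⟩
          have e1 := reaches_det hx3 h1
          have e2 := reaches_det hy3 h2
          omega
        · intro h
          exact ⟨_, hx3, h ▸ hy3⟩
      rw [hLHS]
      have hgx : gP (comp.map fun c => if c = cj then ci else c) x =
          (if gP comp x = cj then ci else gP comp x) := gP_map _ hx.1 (by rw [hclen]; exact hx.2)
      have hgy : gP (comp.map fun c => if c = cj then ci else c) y =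
          (if gP comp y = cj then ci else gP comp y) := gP_map _ hy.1 (by rw [hclen]; exact hy.2)
      rw [hgx, hgy]
      exact collapse_bridge hab_cases hEq
        (hroot_iff_ci x rx hx hrx) (hroot_iff_cj x rx hx hrx)
        (hroot_iff_ci y ry hy hry) (hroot_iff_cj y ry hy hry)
        (hroots_eq x y rx ry hx hy hrx hry)
    · -- sizes after the merge
      intro r hr hroot3
      have hrb : r ≠ b := by
        intro h
        have := hg3 r hr
        rw [if_pos h] at this
        rw [this] at hroot3
        exact hab (hroot3 ▸ h ▸ rfl)
      have hroot2 : gP p2 r = r := by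
        have h := hg3 r hr
        rw [if_neg hrb] at h
        rw [← h]; exact hroot3
      have hrootp : gP p r = r := by
        obtain ⟨s, hs⟩ := hex r hr
        have := reaches_of_root hroot2 (hpres r s hr hs)
        subst this
        exact reaches_root_out hs
      have hrself : Reaches p r r := reaches_self_of_root hrootp
      have hgsize : ∀ z w, InRng n z → gP (PySem.List.pySetD size a w) z = if z = a then w else gP size z := by
        intro z w hz
        exact gP_setD w harng.1 (by rw [hslen]; exact harng.2) z hz.1 (by rw [hslen]; exact hz.2)
      have hla : gP comp a = (if a = ri0 then ci else cj) := by
        rcases hab_cases with ⟨h1, _⟩ | ⟨h1, _⟩ <;> rw [h1] <;> simp [hlci, hlcj, Ne.symm hEq]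
      have hlb : gP comp b = (if a = ri0 then cj else ci) := by
        rcases hab_cases with ⟨h1, h2⟩ | ⟨h1, h2⟩ <;> rw [h1, h2] <;> simp [hlci, hlcj, Ne.symm hEq]
      have hgr : gP (comp.map fun c => if c = cj then ci else c) r =
          (if gP comp r = cj then ci else gP comp r) := gP_map _ hr.1 (by rw [hclen]; exact hr.2)
      show gP (PySem.List.pySetD size a (PySem.List.pyGetD size a 0 + PySem.List.pyGetD size b 0)) r = _
      rw [hgsize r _ hr, hgr]
      by_cases hra : r = a
      · -- merged class
        have haroot : gP p a = a := by
          rcases hab_cases with ⟨h1, _⟩ | ⟨h1, _⟩ <;> rw [h1] <;> assumption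
        have hbroot : gP p b = b := by
          rcases hab_cases with ⟨_, h2⟩ | ⟨_, h2⟩ <;> rw [h2] <;> assumption
        have hsza : gP size a = (comp.count (gP comp a) : Int) := hsz a harng haroot
        have hszb : gP size b = (comp.count (gP comp b) : Int) := hsz b hbrng hbroot
        rw [if_pos hra]
        have hcr : gP comp r = (if a = ri0 then ci else cj) := by rw [hra]; exact hla
        have hcr2 : (if gP comp r = cj then ci else gP comp r) = ci := by
          by_cases hcase : a = ri0 <;> simp [hcr, hcase, hcne]
        rw [hcr2, count_map_collapse hcne]
        have : (PySem.List.pyGetD size a 0 : Int) + PySem.List.pyGetD size b 0 =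
            gP size a + gP size b := rfl
        rw [this, hsza, hszb]
        by_cases hcase : a = ri0
        · rw [hla, hlb, if_pos hcase, if_pos hcase]
          push_cast
          ring
        · rw [hla, hlb, if_neg hcase, if_neg hcase]
          push_cast
          ring
      · -- untouched class
        have hrnotroots : r ≠ ri0 ∧ r ≠ rj0 := by
          constructor <;> intro h <;> rcases hab_cases with ⟨h1, h2⟩ | ⟨h1, h2⟩
          · exact hra (by rw [h, ← h1])
          · exact hrb (by rw [h, ← h2])
          · exact hrb (by rw [h, ← h2])
          · exact hra (by rw [h, ← h1])
        have hlr_ci : gP comp r ≠ ci := by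
          intro h
          exact hrnotroots.1 ((hroot_iff_ci r r hr hrself).2 h)
        have hlr_cj : gP comp r ≠ cj := by
          intro h
          exact hrnotroots.2 ((hroot_iff_cj r r hr hrself).2 h)
        rw [if_neg hra, if_neg hlr_cj, hsz r hr hrootp, count_map_other hlr_ci hlr_cj]
-- ---- a pure (non-compressing) root finder, used only in proofs ----
def rootA : Nat → List Int → Int → Int
  | 0, _, x => x
  | fuel + 1, p, x => if gP p x = x then x else rootA fuel p (gP p x)

theorem rootA_spec : ∀ (fuel : Nat) (p : List Int) (x r : Int) (k : Nat),
    UFReach p x r k → k < fuel → rootA fuel p x = r := by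
  intro fuel
  induction fuel with
  | zero => intro _ _ _ k _ h; omega
  | succ fuel ih =>
    intro p x r k hk hlt
    cases hk with
    | root _ h => simp [rootA, h]
    | step _ _ k0 hne h2 =>
      rw [show rootA (fuel + 1) p x = rootA fuel p (gP p x) from by simp [rootA, hne]]
      exact ih p _ r k0 h2 (by omega)

-- ---- a dict whose values are a function of the key, built by repeated insert ----
theorem dict_insert_keyed (v : Int → Int) (t : List Int) (k : Int) :
    (PySem.Dict.mk (t.map (fun r => (r, v r)))).insert k (v k) =
      PySem.Dict.mk ((PySem.Set.add t k).map (fun r => (r, v r))) := by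
  by_cases hmem : k ∈ t
  · have hc : (PySem.Dict.mk (t.map fun r => (r, v r))).contains k = true := by
      rw [PySem.Dict.contains_mk]
      rw [List.any_map]
      simp only [List.any_eq_true]
      exact ⟨k, hmem, by simp⟩
    apply PySem.Dict.ext
    rw [PySem.Dict.items_insert_of_contains _ _ hc]
    show (t.map fun r => (r, v r)).map (fun q => if q.1 == k then (k, v k) else q) =
      ((PySem.Set.add t k).map (fun r => (r, v r)))
    have hadd : PySem.Set.add t k = t := by
      simp [PySem.Set.add, PySem.Set.contains, hmem]
    rw [hadd, List.map_map]
    apply List.map_congr_left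
    intro r _
    by_cases hr : r = k <;> simp [hr, beq_iff_eq]
  · have hc : (PySem.Dict.mk (t.map fun r => (r, v r))).contains k = false := by
      rw [PySem.Dict.contains_mk]
      rw [List.any_map]
      simp only [List.any_eq_false]
      intro r hr
      simp only [Function.comp_apply, beq_iff_eq]
      intro h; exact hmem (h ▸ hr)
    apply PySem.Dict.ext
    rw [PySem.Dict.items_insert_of_not_contains _ _ hc]
    have hadd : PySem.Set.add t k = t ++ [k] := by
      simp [PySem.Set.add, PySem.Set.contains, hmem]
    rw [hadd]
    simp

-- ---- first-occurrence representatives of idx under a key function f ----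
def reps (f : Int → Int) : List Int → List Int → List Int
  | [], acc => acc
  | x :: t, acc => if f x ∈ acc.map f then reps f t acc else reps f t (acc ++ [x])

theorem foldl_add_eq_reps (f : Int → Int) : ∀ (idx acc : List Int),
    (idx.map f).foldl PySem.Set.add (acc.map f) = (reps f idx acc).map f := by
  intro idx
  induction idx with
  | nil => intro acc; rfl
  | cons x t ih =>
    intro acc
    show (t.map f).foldl PySem.Set.add (PySem.Set.add (acc.map f) (f x)) = (reps f (x :: t) acc).map f
    by_cases hmem : f x ∈ acc.map f
    · rw [show PySem.Set.add (acc.map f) (f x) = acc.map f from by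
        simp [PySem.Set.add, PySem.Set.contains, hmem]]
      rw [show reps f (x :: t) acc = reps f t acc from by simp [reps, hmem]]
      exact ih acc
    · rw [show PySem.Set.add (acc.map f) (f x) = (acc ++ [x]).map f from by
        simp [PySem.Set.add, PySem.Set.contains, hmem]]
      rw [show reps f (x :: t) acc = reps f t (acc ++ [x]) from by simp [reps, hmem]]
      exact ih (acc ++ [x])

theorem reps_congr (f g : Int → Int) : ∀ (idx acc : List Int),
    (∀ x ∈ acc ++ idx, ∀ y ∈ acc ++ idx, (f x = f y ↔ g x = g y)) →
    reps f idx acc = reps g idx acc := by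
  intro idx
  induction idx with
  | nil => intro acc _; rfl
  | cons x t ih =>
    intro acc H
    have hx : x ∈ acc ++ x :: t := by simp
    have hcond : (f x ∈ acc.map f) ↔ (g x ∈ acc.map g) := by
      simp only [List.mem_map]
      constructor
      · rintro ⟨y, hy, he⟩
        exact ⟨y, hy, (H y (by simp [hy]) x hx).1 he⟩
      · rintro ⟨y, hy, he⟩
        exact ⟨y, hy, (H y (by simp [hy]) x hx).2 he⟩
    by_cases hmem : f x ∈ acc.map f
    · rw [show reps f (x :: t) acc = reps f t acc from by simp [reps, hmem],
          show reps g (x :: t) acc = reps g t acc from by simp [reps, hcond.1 hmem]]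
      apply ih
      intro a ha b hb
      exact H a (by simp at ha ⊢; tauto) b (by simp at hb ⊢; tauto)
    · rw [show reps f (x :: t) acc = reps f t (acc ++ [x]) from by simp [reps, hmem],
          show reps g (x :: t) acc = reps g t (acc ++ [x]) from by
            have hgmem : g x ∉ acc.map g := fun h => hmem (hcond.2 h)
            simp only [reps]
            rw [if_neg hgmem]]
      apply ih
      intro a ha b hb
      exact H a (by simp at ha ⊢; tauto) b (by simp at hb ⊢; tauto)

theorem reps_sub (f : Int → Int) : ∀ (idx acc : List Int) (z : Int),
    z ∈ reps f idx acc → z ∈ acc ++ idx := by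
  intro idx
  induction idx with
  | nil => intro acc z h; simpa using h
  | cons x t ih =>
    intro acc z h
    by_cases hmem : f x ∈ acc.map f
    · rw [show reps f (x :: t) acc = reps f t acc from by simp [reps, hmem]] at h
      have := ih acc z h
      simp at this ⊢
      tauto
    · rw [show reps f (x :: t) acc = reps f t (acc ++ [x]) from by simp [reps, hmem]] at h
      have := ih (acc ++ [x]) z h
      simp at this ⊢
      tauto

theorem set_ofList_map (f : Int → Int) (idx : List Int) :
    PySem.Set.ofList (idx.map f) = (reps f idx []).map f := by
  rw [PySem.Set.ofList_eq_foldl]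
  exact foldl_add_eq_reps f idx []

theorem set_map_congr (f g v w : Int → Int) (idx : List Int)
    (hfg : ∀ x ∈ idx, ∀ y ∈ idx, (f x = f y ↔ g x = g y))
    (hvw : ∀ x ∈ idx, v (f x) = w (g x)) :
    (PySem.Set.ofList (idx.map f)).map v = (PySem.Set.ofList (idx.map g)).map w := by
  rw [set_ofList_map, set_ofList_map, List.map_map, List.map_map]
  rw [reps_congr f g idx [] (by simpa using hfg)]
  apply List.map_congr_left
  intro z hz
  have hzidx : z ∈ idx := by simpa using reps_sub g idx [] z hz
  simpa using hvw z hzidx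

-- ---- the get_component_sizes loop ----
theorem sizes_loop {n : Nat} {p size : List Int} (hinvp : InvB n p) :
    ∀ (idx : List Int) (par t : List Int),
    InvB n par →
    (∀ y s, InRng n y → Reaches p y s → Reaches par y s) →
    (∀ x ∈ idx, InRng n x) →
    ((idx.foldl (fun (st : List Int × PySem.Dict Int Int) i =>
        let f := ufFind (st.1.length + 1) st.1 i
        (f.1, st.2.insert f.2 (PySem.List.pyGetD size f.2 0)))
      (par, PySem.Dict.mk (t.map (fun r => (r, PySem.List.pyGetD size r 0))))).2) =
    PySem.Dict.mk (((idx.map (fun x => rootA (n + 1) p x)).foldl PySem.Set.add t).map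
      (fun r => (r, PySem.List.pyGetD size r 0))) := by
  intro idx
  induction idx with
  | nil => intro par t _ _ _; rfl
  | cons x rest ih =>
    intro par t hpar hpres hmem
    have hx : InRng n x := hmem x (List.mem_cons_self ..)
    obtain ⟨rx, hrx⟩ := hinvp.2 x hx
    obtain ⟨k0, hk0⟩ := hrx
    have hroot : rootA (n + 1) p x = rx :=
      rootA_spec (n + 1) p x rx k0 hk0 (by have := ufreach_len_lt hinvp.1 hx hk0; omega)
    have hrxpar : Reaches par x rx := hpres x rx hx ⟨k0, hk0⟩
    obtain ⟨k1, hk1⟩ := hrxpar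
    have hparlen : par.length = n := hpar.1.1
    have F := find_spec (n := n) (par.length + 1) par x rx k1 hpar hx hk1
      (by have := ufreach_len_lt hpar.1 hx hk1; omega)
    obtain ⟨hf2, hinv', hpres'⟩ := F
    simp only [List.foldl_cons, List.map_cons]
    rw [hf2, hroot]
    rw [dict_insert_keyed (fun r => PySem.List.pyGetD size r 0) t rx]
    exact ih (ufFind (par.length + 1) par x).1 (PySem.Set.add t rx) hinv'
      (fun y s hy hs => hpres' y s hy (hpres y s hy hs))
      (fun y hy => hmem y (List.mem_cons_of_mem _ hy))

theorem ufSizes_eq {n : Nat} {p size : List Int} (hinv : InvB n p) :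
    ufSizes p size =
      (PySem.Set.ofList ((PySem.List.pyRange 0 ((n : Int)) 1).map (fun x => rootA (n + 1) p x))).map
        (fun r => PySem.List.pyGetD size r 0) := by
  have hplen : p.length = n := hinv.1.1
  have hidx : ∀ x ∈ PySem.List.pyRange 0 ((n : Int)) 1, InRng n x := by
    intro x hx
    have := PySem.List.mem_pyRange_one.1 hx
    exact ⟨this.1, this.2⟩
  have hloop := sizes_loop (n := n) (p := p) (size := size) hinv
    (PySem.List.pyRange 0 ((n : Int)) 1) p [] hinv (fun y s _ h => h) hidx
  unfold ufSizes
  rw [PySem.List.len_eq, hplen]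
  rw [show (PySem.Dict.empty : PySem.Dict Int Int) =
      PySem.Dict.mk (([] : List Int).map (fun r => (r, PySem.List.pyGetD size r 0))) from rfl]
  rw [hloop]
  rw [PySem.Dict.values_mk, List.map_map]
  rw [PySem.Set.ofList_eq_foldl]
  rfl

-- ---- B's counting dict ----
theorem counts_values (comp : List Int) :
    (comp.foldl (fun (d : PySem.Dict Int Int) c => d.insert c (d.getD c 0 + 1)) PySem.Dict.empty).values
      = (PySem.Set.ofList comp).map (fun c => (comp.count c : Int)) := by
  rw [PySem.Dict.foldl_insert_getD_add_one_eq_counter]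
  have h := PySem.Dict.items_counter comp
  have hv : (PySem.Dict.counter comp).values = (PySem.Dict.counter comp).items.map (·.2) := rfl
  rw [hv, h, List.map_map]
  rfl

-- ---- the bridge: A's size list equals B's counter values ----
theorem sizes_bridge {n : Nat} {p size comp : List Int} (hinv : INVP n p size comp) :
    ufSizes p size =
      (comp.foldl (fun (d : PySem.Dict Int Int) c => d.insert c (d.getD c 0 + 1)) PySem.Dict.empty).values := by
  obtain ⟨hinvB, hslen, hclen, hiff, hsz⟩ := hinv
  have hb : PB n p := hinvB.1
  have hcomp : comp = (PySem.List.pyRange 0 ((n : Int)) 1).map (fun x => gP comp x) := by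
    apply List.ext_getElem
    · rw [List.length_map, PySem.List.length_pyRange_one]; omega
    · intro m h1 h2
      rw [List.getElem_map, PySem.List.getElem_pyRange_one]
      unfold gP
      have hm : m < comp.length := h1
      rw [show ((0 : Int) + (m : Int)) = ((m : Nat) : Int) from by omega]
      rw [PySem.List.pyGetD_natCast]
      rw [List.getD_eq_getElem?_getD]
      rw [List.getElem?_eq_getElem hm]
      rfl
  rw [ufSizes_eq hinvB, counts_values]
  rw [show PySem.Set.ofList comp =
      PySem.Set.ofList ((PySem.List.pyRange 0 ((n : Int)) 1).map (fun x => gP comp x)) from by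
    rw [← hcomp]]
  have hrng : ∀ x ∈ PySem.List.pyRange 0 ((n : Int)) 1, InRng n x := by
    intro x hx
    have := PySem.List.mem_pyRange_one.1 hx
    exact ⟨this.1, this.2⟩
  apply set_map_congr
  · intro x hx y hy
    have hxr : InRng n x := hrng x hx
    have hyr : InRng n y := hrng y hy
    obtain ⟨rx, hrx⟩ := hinvB.2 x hxr
    obtain ⟨ry, hry⟩ := hinvB.2 y hyr
    obtain ⟨kx, hkx⟩ := hrx
    obtain ⟨ky, hky⟩ := hry
    rw [rootA_spec (n + 1) p x rx kx hkx (by have := ufreach_len_lt hb hxr hkx; omega),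
        rootA_spec (n + 1) p y ry ky hky (by have := ufreach_len_lt hb hyr hky; omega)]
    constructor
    · intro h
      exact (hiff x y hxr hyr).1 ⟨rx, ⟨kx, hkx⟩, h ▸ ⟨ky, hky⟩⟩
    · intro h
      obtain ⟨t, h1, h2⟩ := (hiff x y hxr hyr).2 h
      have e1 := reaches_det ⟨kx, hkx⟩ h1
      have e2 := reaches_det ⟨ky, hky⟩ h2
      omega
  · intro x hx
    have hxr : InRng n x := hrng x hx
    obtain ⟨rx, hrx⟩ := hinvB.2 x hxr
    obtain ⟨kx, hkx⟩ := hrx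
    rw [rootA_spec (n + 1) p x rx kx hkx (by have := ufreach_len_lt hb hxr hkx; omega)]
    have hrxrng : InRng n rx := reaches_rng hb ⟨kx, hkx⟩ hxr
    have hrxroot : gP p rx = rx := reaches_root_out ⟨kx, hkx⟩
    have hlab : gP comp rx = gP comp x :=
      (hiff rx x hrxrng hxr).1 ⟨rx, reaches_self_of_root hrxroot, ⟨kx, hkx⟩⟩
    have hs := hsz rx hrxrng hrxroot
    exact hs.trans (by rw [hlab])

-- ---- the initial state ----
theorem invp_init (n : Nat) :
    INVP n (PySem.List.pyRange 0 ((n : Int)) 1) (List.replicate n 1) (PySem.List.pyRange 0 ((n : Int)) 1) := by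
  have hlen : (PySem.List.pyRange 0 ((n : Int)) 1).length = n := by
    rw [PySem.List.length_pyRange_one]; omega
  have hg : ∀ x, InRng n x → gP (PySem.List.pyRange 0 ((n : Int)) 1) x = x := by
    intro x hx
    obtain ⟨hx0, hx1⟩ := hx
    unfold gP
    rw [PySem.List.pyGetD_eq_getElem _ _ hx0 (by rw [hlen]; exact hx1)]
    rw [PySem.List.getElem_pyRange_one]
    omega
  have hpb : PB n (PySem.List.pyRange 0 ((n : Int)) 1) := by
    refine ⟨hlen, ?_⟩
    intro x hx
    rw [hg x hx]; exact hx
  refine ⟨⟨hpb, fun x hx => ⟨x, reaches_self_of_root (hg x hx)⟩⟩, by simp, hlen, ?_, ?_⟩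
  · intro x y hx hy
    rw [hg x hx, hg y hy]
    constructor
    · rintro ⟨t, h1, h2⟩
      have e1 : t = x := reaches_of_root (hg x hx) h1
      have e2 : t = y := reaches_of_root (hg y hy) h2
      omega
    · intro h
      exact ⟨x, reaches_self_of_root (hg x hx), h ▸ reaches_self_of_root (hg x hx)⟩
  · intro r hr hroot
    obtain ⟨hr0, hr1⟩ := hr
    rw [hg r ⟨hr0, hr1⟩]
    have hmem : r ∈ PySem.List.pyRange 0 ((n : Int)) 1 :=
      PySem.List.mem_pyRange_one.2 ⟨hr0, hr1⟩
    rw [List.count_eq_one_of_mem (PySem.List.nodup_pyRange_one 0 ((n : Int))) hmem]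
    unfold gP
    rw [PySem.List.pyGetD_eq_getElem _ _ hr0 (by simp; omega)]
    simp

-- ---- folding the selected edges through both programs together ----
theorem fold_inv {n : Nat} : ∀ (E : List (Int × Int × Int)) (p size comp : List Int),
    INVP n p size comp → (∀ e ∈ E, InRng n e.2.1 ∧ InRng n e.2.2) →
    INVP n
      (E.foldl (fun (st : List Int × List Int) e => ufUnion st.1 st.2 e.2.1 e.2.2) (p, size)).1
      (E.foldl (fun (st : List Int × List Int) e => ufUnion st.1 st.2 e.2.1 e.2.2) (p, size)).2
      (E.foldl (fun comp e =>
        let ci := PySem.List.pyGetD comp e.2.1 0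
        let cj := PySem.List.pyGetD comp e.2.2 0
        if ci ≠ cj then comp.map (fun c => if c = cj then ci else c) else comp) comp) := by
  intro E
  induction E with
  | nil => intro p size comp h _; exact h
  | cons e E ih =>
    intro p size comp h hmem
    have he := hmem e (List.mem_cons_self ..)
    have step := union_step h he.1 he.2
    simp only [List.foldl_cons]
    exact ih _ _ _ step (fun e' he' => hmem e' (List.mem_cons_of_mem _ he'))
-- ---- under Pre_, parse_input succeeds ----
theorem parseLines_isSome : ∀ (ls : List (List Char)),
    (∀ line ∈ ls, PySem.Chars.strip line ≠ [] →
      (PySem.Chars.splitOn line [',']).length = 3 ∧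
      ∀ f ∈ PySem.Chars.splitOn line [','], (PySem.Int.ofChars? f).isSome = true) →
    (parseLines ls).isSome = true := by
  intro ls
  induction ls with
  | nil => intro _; rfl
  | cons line rest ih =>
    intro H
    rw [parseLines]
    by_cases hs : PySem.Chars.strip line = []
    · rw [if_pos hs]
      exact ih (fun l hl => H l (List.mem_cons_of_mem _ hl))
    · rw [if_neg hs]
      obtain ⟨hlen, hall⟩ := H line (List.mem_cons_self ..) hs
      match h3 : PySem.Chars.splitOn line [','] with
      | [] | [_] | [_, _] | _ :: _ :: _ :: _ :: _ => rw [h3] at hlen; simp at hlen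
      | [a, b, c] =>
        have ha := hall a (by rw [h3]; simp)
        have hb := hall b (by rw [h3]; simp)
        have hc := hall c (by rw [h3]; simp)
        obtain ⟨x, hx⟩ := Option.isSome_iff_exists.1 ha
        obtain ⟨y, hy⟩ := Option.isSome_iff_exists.1 hb
        obtain ⟨z, hz⟩ := Option.isSome_iff_exists.1 hc
        dsimp only
        rw [hx, hy, hz]
        rw [Option.isSome_map]
        exact ih (fun l hl => H l (List.mem_cons_of_mem _ hl))

-- ---- selection: nsmallest(k, xs) versus sort-then-slice ----
theorem sel_eq (k : Int) (ps : List (Int × Int × Int)) :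
    nsmallestEdges k (iterEdges ps) =
      (if 0 < k then
        PySem.List.slice (PySem.List.sorted2 (iterEdges ps) (fun e => e.1) (fun e => e.2.1) false)
          none (some k)
      else []) := by
  unfold nsmallestEdges
  by_cases hk : k ≤ 0
  · rw [if_pos hk, if_neg (by omega)]
  · rw [if_neg hk, if_pos (by omega), PySem.List.slice_to _ (by omega)]

theorem sel_mem (k : Int) (ps : List (Int × Int × Int)) :
    ∀ e ∈ nsmallestEdges k (iterEdges ps), InRng ps.length e.2.1 ∧ InRng ps.length e.2.2 := by
  intro e he
  have h2 : e ∈ iterEdges ps := by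
    unfold nsmallestEdges at he
    split_ifs at he with hk
    · simp at he
    · exact (PySem.List.sorted2_perm (iterEdges ps) _ _ false).mem_iff.1 (List.mem_of_mem_take he)
  unfold iterEdges at h2
  rw [List.mem_flatMap] at h2
  obtain ⟨i, hi, h3⟩ := h2
  rw [List.mem_map] at h3
  obtain ⟨j, hj, he'⟩ := h3
  have hi' := PySem.List.mem_pyRange_one.1 hi
  have hj' := PySem.List.mem_pyRange_one.1 hj
  rw [PySem.List.len_eq] at hi' hj'
  rw [← he']
  dsimp only
  exact ⟨⟨by omega, by omega⟩, ⟨by omega, by omega⟩⟩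
-- ===== VERDICT (by name: the statement is the Claim_ definition above) =====
theorem part1_spec : Claim_equal_part1 := by
  unfold Claim_equal_part1
  intro data k _ hpre
  unfold Spec_part1 part1 part1_alt
  cases hparse : parseInput? data with
  | none =>
    exfalso
    have hsome := parseLines_isSome (PySem.Chars.splitOn data.toList ['\n']) hpre
    rw [show parseLines (PySem.Chars.splitOn data.toList ['\n']) = parseInput? data from rfl,
        hparse] at hsome
    simp at hsome
  | some ps =>
    dsimp only
    have hinvF := fold_inv (n := ps.length) (nsmallestEdges k (iterEdges ps))
      (PySem.List.pyRange 0 ((ps.length : Int)) 1) (List.replicate ps.length 1)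
      (PySem.List.pyRange 0 ((ps.length : Int)) 1) (invp_init ps.length) (sel_mem k ps)
    have hkey := sizes_bridge hinvF
    have hsel := sel_eq k ps
    rw [← hsel, hkey]
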